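-- pv_equiv track=rewrite | github.com/AndrewDul/smart-desk-ai-assistant | modules/runtime/validation/flow_service.py | _priority_segments
-- ===== SOURCE A (Python) =====
-- def _priority_segments(failed_check_keys: list[str]) -> list[str]:
--     counts = {"voice": 0, "skill": 0, "llm": 0}
--     for key in failed_check_keys:
--         for segment in counts:
--             if key.startswith(f"{segment}."):
--                 counts[segment] += 1
--     ordered = [
--         segment
--         for segment, count in sorted(counts.items(), key=lambda item: (-item[1], item[0]))
--         if count > 0
--     ]
--     return ordered
-- ===== SOURCE B (Python) =====
-- def _priority_segments(failed_check_keys: list[str]) -> list[str]: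
--     ordered = []
--     for name in ("llm", "skill", "voice"):
--         cnt = sum(1 for key in failed_check_keys if key.startswith(name + "."))
--         if cnt > 0:
--             i = 0
--             while i < len(ordered) and ordered[i][1] >= cnt:
--                 i += 1
--             ordered.insert(i, (name, cnt))
--     return [name for name, _ in ordered]
-- ===== Notes on version B (the rewrite author's own statement) =====
-- stated objective: alternative
-- what changed: A makes one pass over the keys scanning all three candidate prefixes per key into a pre-seeded dict and then library-sorts its items by (-count, name) and filters positives; B instead makes one counting pass per candidate prefix (processed in ascending name order) and builds the result directly by manual position-scan insertion into the at-most-3-element ordered list, with no dict and no sort call.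
import Mathlib
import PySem

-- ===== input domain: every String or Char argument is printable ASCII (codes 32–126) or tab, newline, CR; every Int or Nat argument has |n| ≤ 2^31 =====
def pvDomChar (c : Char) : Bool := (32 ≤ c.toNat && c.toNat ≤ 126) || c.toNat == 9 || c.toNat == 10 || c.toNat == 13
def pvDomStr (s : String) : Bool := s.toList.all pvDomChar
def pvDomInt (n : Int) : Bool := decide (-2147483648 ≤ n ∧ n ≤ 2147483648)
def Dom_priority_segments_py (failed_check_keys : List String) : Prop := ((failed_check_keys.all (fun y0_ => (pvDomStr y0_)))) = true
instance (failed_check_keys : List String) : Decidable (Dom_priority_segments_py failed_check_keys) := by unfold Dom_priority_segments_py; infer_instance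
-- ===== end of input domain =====

-- B replaces A's single pass (inner scan over three candidates mutating a pre-seeded dict,
-- then a library sort + filter) by one counting pass per candidate prefix and a manual
-- ordered insertion into the ≤3-element result — no dict, no sort call (objective: alternative).

-- ===== PORT A =====
def priority_segments_py (failed_check_keys : List String) : List String :=
  let counts0 : PySem.Dict String Int := PySem.Dict.ofList [("voice", 0), ("skill", 0), ("llm", 0)]
  let counts := failed_check_keys.foldl (fun d key =>
      d.keys.foldl (fun d2 segment =>
        if PySem.Str.startswith key (segment ++ ".") then
          d2.insert segment (d2.getD segment 0 + 1)
        else d2) d) counts0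
  ((PySem.List.sorted2 counts.items (fun it => -it.2) (fun it => it.1)).filter
      (fun it => decide ((0:Int) < it.2))).map (fun it => it.1)

-- ===== PORT B =====
-- the 'while i < len(ordered) and ordered[i][1] >= cnt' scan + 'ordered.insert(i, …)'
-- of Source B, as structural recursion on the accumulator
def pvIns (cnt : Int) (name : String) : List (String × Int) → List (String × Int)
  | [] => [(name, cnt)]
  | p :: rest => if p.2 ≥ cnt then p :: pvIns cnt name rest else (name, cnt) :: p :: rest

def priority_segments_py_alt (failed_check_keys : List String) : List String :=
  let ordered := (["llm", "skill", "voice"] : List String).foldl (fun acc name =>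
      let cnt := failed_check_keys.foldl
        (fun n key => if PySem.Str.startswith key (name ++ ".") then n + 1 else n) (0 : Int)
      if 0 < cnt then pvIns cnt name acc else acc) []
  ordered.map (fun p => p.1)

-- ===== PRECONDITION & SPEC =====
def Spec_priority_segments_py (failed_check_keys : List String) (out : List String) : Prop := out = priority_segments_py_alt failed_check_keys
instance (failed_check_keys : List String) (out : List String) : Decidable (Spec_priority_segments_py failed_check_keys out) := by unfold Spec_priority_segments_py; infer_instance

-- ===== CLAIM (what is proved, stated in full; the proofs are below) =====
def Claim_equal_priority_segments_py : Prop := ∀ (failed_check_keys : List String), Dom_priority_segments_py failed_check_keys → Spec_priority_segments_py failed_check_keys (priority_segments_py failed_check_keys)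

-- ===== LEMMAS AND PROOFS =====

-- A's per-key test, per candidate segment
def pvA (c : String) : String → Bool := fun k => PySem.Str.startswith k (c ++ ".")

-- A's counting loop, evaluated: the dict stays the three seeded keys, each holding its countP
theorem countsA_fold (keys : List String) : ∀ (a b c : Int),
    keys.foldl (fun d key =>
      d.keys.foldl (fun d2 segment =>
        if PySem.Str.startswith key (segment ++ ".") then
          d2.insert segment (d2.getD segment 0 + 1)
        else d2) d)
      (PySem.Dict.mk [("voice", a), ("skill", b), ("llm", c)]) =
    PySem.Dict.mk [("voice", a + (keys.countP (pvA "voice") : Int)),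
                   ("skill", b + (keys.countP (pvA "skill") : Int)),
                   ("llm", c + (keys.countP (pvA "llm") : Int))] := by
  induction keys with
  | nil => simp
  | cons key rest ih =>
    intro a b c
    rw [List.foldl_cons, List.countP_cons, List.countP_cons, List.countP_cons]
    have hstep : (PySem.Dict.mk [("voice", a), ("skill", b), ("llm", c)]).keys.foldl
        (fun d2 segment =>
          if PySem.Str.startswith key (segment ++ ".") then
            d2.insert segment (d2.getD segment 0 + 1)
          else d2) (PySem.Dict.mk [("voice", a), ("skill", b), ("llm", c)]) =
        PySem.Dict.mk [("voice", a + if pvA "voice" key then 1 else 0),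
                       ("skill", b + if pvA "skill" key then 1 else 0),
                       ("llm", c + if pvA "llm" key then 1 else 0)] := by
      simp only [PySem.Dict.keys_mk, List.map, List.foldl_cons, List.foldl_nil]
      unfold pvA
      cases hv : PySem.Str.startswith key ("voice" ++ ".") <;>
        cases hs : PySem.Str.startswith key ("skill" ++ ".") <;>
          cases hl : PySem.Str.startswith key ("llm" ++ ".") <;>
            simp [PySem.Dict.insert, PySem.Dict.getD, PySem.Dict.get?, hv, hs, hl]
    rw [hstep, ih]
    cases hv : pvA "voice" key <;> cases hs : pvA "skill" key <;> cases hl : pvA "llm" key <;>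
      simp [hv, hs, hl, add_assoc, add_comm, add_left_comm]

-- A's tuple-key sort is the sort by the lex key
theorem sorted2_eq_sorted_lex {α : Type} (xs : List α) (k1 : α → Int) (k2 : α → String) :
    PySem.List.sorted2 xs k1 k2 = PySem.List.sorted xs (fun x => toLex (k1 x, k2 x)) := by
  rw [PySem.List.sorted_eq_foldl_insertBy]
  unfold PySem.List.sorted2
  have hb : (fun a b => decide (k1 a < k1 b) || !decide (k1 b < k1 a) && decide (k2 a < k2 b)) =
      (fun a b => decide ((toLex (k1 a, k2 a)) < toLex (k1 b, k2 b))) := by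
    funext a b
    rcases lt_trichotomy (k1 a) (k1 b) with h | h | h
    · simp [Prod.Lex.toLex_lt_toLex, h, not_lt_of_gt h]
    · simp [Prod.Lex.toLex_lt_toLex, h]
    · simp [Prod.Lex.toLex_lt_toLex, h, not_lt_of_gt h, h.ne']
  simp only [hb]
  rfl

-- the heart: for ANY three counts, A's sort-then-filter of the three pairs equals
-- B's guarded insertion over the pairs in ascending-name order
set_option maxHeartbeats 2000000 in
theorem main_case (v s l : Int) :
    (PySem.List.sorted2 [("voice", v), ("skill", s), ("llm", l)]
        (fun it => -it.2) (fun it => it.1)).filter (fun it => decide ((0:Int) < it.2))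
    = (([("llm", l), ("skill", s), ("voice", v)] : List (String × Int)).foldl
        (fun acc p => if 0 < p.2 then pvIns p.2 p.1 acc else acc) []) := by
  rw [sorted2_eq_sorted_lex, PySem.List.sorted_eq_foldl_insertBy]
  simp only [List.foldl_cons, List.foldl_nil, PySem.List.insertBy, pvIns,
    Prod.Lex.toLex_lt_toLex]
  have h1 : (("skill":String) < "voice") = True := by simp [String.lt_iff_toList_lt]; decide
  have h2 : (("llm":String) < "voice") = True := by simp [String.lt_iff_toList_lt]; decide
  have h3 : (("llm":String) < "skill") = True := by simp [String.lt_iff_toList_lt]; decide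
  have h4 : (("voice":String) < "skill") = False := by simp [String.lt_iff_toList_lt]; decide
  have h5 : (("voice":String) < "llm") = False := by simp [String.lt_iff_toList_lt]; decide
  have h6 : (("skill":String) < "llm") = False := by simp [String.lt_iff_toList_lt]; decide
  simp only [h1, h2, h3, h4, h5, h6, and_true, and_false, or_false, or_true]
  split_ifs
  all_goals try simp_all only [PySem.List.insertBy, pvIns, h1, h2, h3, h4, h5, h6,
    decide_true, decide_false, Bool.and_true, Bool.and_false, Bool.or_false, Bool.or_true]
  all_goals try split_ifs
  all_goals try simp_all only [PySem.List.insertBy, pvIns, h1, h2, h3, h4, h5, h6,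
    decide_true, decide_false, Bool.and_true, Bool.and_false, Bool.or_false, Bool.or_true]
  all_goals try split_ifs
  all_goals simp_all [List.filter]
  all_goals try omega
  all_goals try ((repeat' split) <;> first | rfl | (exfalso; simp_all; omega))

-- ===== VERDICT (by name: the statement is the Claim_ definition above) =====
theorem priority_segments_py_spec : Claim_equal_priority_segments_py := by
  intro keys _hdom
  unfold Spec_priority_segments_py priority_segments_py priority_segments_py_alt
  dsimp only
  -- A side: evaluate the counting loop
  rw [show (PySem.Dict.ofList [("voice", (0:Int)), ("skill", 0), ("llm", 0)]) =
      PySem.Dict.mk [("voice", 0), ("skill", 0), ("llm", 0)] from rfl]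
  rw [countsA_fold keys 0 0 0]
  -- B side: each per-prefix counting pass is a countP
  have hcnt : ∀ name : String,
      keys.foldl (fun n key => if PySem.Str.startswith key (name ++ ".") then n + 1 else n) (0 : Int)
        = (0 : Int) + (keys.countP (pvA name) : Int) := fun name =>
    PySem.List.foldl_if_add_one (pvA name) keys 0
  simp only [List.foldl_cons, List.foldl_nil, hcnt]
  -- both sides are now the three counts; apply the core lemma and take first components
  have h := main_case (0 + (keys.countP (pvA "voice") : Int))
      (0 + (keys.countP (pvA "skill") : Int)) (0 + (keys.countP (pvA "llm") : Int))
  simp only [List.foldl_cons, List.foldl_nil] at h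
  exact congrArg (List.map (fun it => it.1)) h
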